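-- pv_equiv track=rewrite | github.com/piterre/TIPE | reseau_glouton.py | indices_valeur_max
-- ===== SOURCE A (Python) =====
-- def indices_valeur_max(matrice, filtre):
--   i_max, j_max = 0, 0
--   val_max = matrice[0][0]
--   for i in filtre:
--     ligne = matrice[i]
--     for j, val in enumerate(ligne):
--       if (val > val_max):
--         val_max = val
--         i_max, j_max = i, j
--   return i_max, j_max
-- ===== SOURCE B (Python) =====
-- def indices_valeur_max(matrice, filtre):
--     # Two-phase reduction: per-row max via max()/index(), then a max-of-maxima
--     # pass with strict > so ties keep the earliest row and the (0,0) sentinel.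
--     best_val, bi, bj = matrice[0][0], 0, 0
--     for i in filtre:
--         ligne = matrice[i]
--         if not ligne:
--             continue
--         m = max(ligne)
--         if m > best_val:
--             best_val, bi, bj = m, i, ligne.index(m)
--     return bi, bj
-- ===== Notes on version B (the rewrite author's own statement) =====
-- stated objective: alternative
-- what changed: Replaces A's single flat running-max scan over (row, column) pairs by a two-phase reduction: each filtered row's maximum and its first column are obtained with max()/list.index(), and a global strict-> comparison keeps only whole-row results.
import Mathlib
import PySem

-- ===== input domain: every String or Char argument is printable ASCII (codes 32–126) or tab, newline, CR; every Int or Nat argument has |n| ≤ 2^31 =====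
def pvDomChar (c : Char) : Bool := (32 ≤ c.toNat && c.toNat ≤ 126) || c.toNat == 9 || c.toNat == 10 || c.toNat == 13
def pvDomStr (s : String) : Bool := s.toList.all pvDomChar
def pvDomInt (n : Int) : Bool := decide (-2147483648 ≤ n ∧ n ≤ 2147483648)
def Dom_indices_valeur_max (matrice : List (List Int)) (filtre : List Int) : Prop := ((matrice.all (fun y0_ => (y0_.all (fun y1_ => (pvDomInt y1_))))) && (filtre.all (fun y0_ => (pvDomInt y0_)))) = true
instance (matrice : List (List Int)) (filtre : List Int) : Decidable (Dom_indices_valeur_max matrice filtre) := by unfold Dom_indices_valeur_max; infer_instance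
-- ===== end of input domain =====

-- ===== PORT A =====
-- B changes the decomposition only (per-row maxima then max-of-maxima); same cost, same results.
-- inner loop of A: 'for j, val in enumerate(ligne)' carrying (i_max, j_max, val_max)
def ivmInner (i : Int) (j : Nat) (ligne : List Int) (st : Int × Int × Int) : Int × Int × Int :=
  match ligne with
  | [] => st
  | v :: rest =>
      ivmInner i (j + 1) rest (if v > st.2.2 then (i, (j : Int), v) else st)

def indices_valeur_max (matrice : List (List Int)) (filtre : List Int) : Int × Int :=
  -- val_max = matrice[0][0]; defaults only reachable outside Pre_ (Python raises there)
  let val0 : Int := ((PySem.List.pyGet? ((PySem.List.pyGet? matrice 0).getD []) 0).getD 0)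
  let st := filtre.foldl
    (fun (st : Int × Int × Int) (i : Int) =>
      let ligne := (PySem.List.pyGet? matrice i).getD []
      ivmInner i 0 ligne st)
    (0, 0, val0)
  (st.1, st.2.1)

-- ===== PORT B =====
def indices_valeur_max_alt (matrice : List (List Int)) (filtre : List Int) : Int × Int :=
  -- state is (best_val, bi, bj), as in Source B
  let st := filtre.foldl
    (fun (st : Int × Int × Int) (i : Int) =>
      let ligne := (PySem.List.pyGet? matrice i).getD []
      match PySem.List.max? ligne (fun x => x) with
      | none => st
      | some m =>
          if m > st.1 then (m, i, (((PySem.List.index? ligne m).getD 0 : Nat) : Int)) else st)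
    (((PySem.List.pyGet? ((PySem.List.pyGet? matrice 0).getD []) 0).getD 0), 0, 0)
  (st.2.1, st.2.2)

-- ===== PRECONDITION & SPEC =====
-- Pre_: exactly where Python A returns: matrice[0][0] exists and every filtre index is in range.
def Pre_indices_valeur_max (matrice : List (List Int)) (filtre : List Int) : Prop :=
  matrice ≠ [] ∧ matrice.headD [] ≠ [] ∧ ∀ i ∈ filtre, PySem.Raise.InRange matrice.length i

instance (matrice : List (List Int)) (filtre : List Int) : Decidable (Pre_indices_valeur_max matrice filtre) := by
  unfold Pre_indices_valeur_max; infer_instance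

def pvWitness_indices_valeur_max : List (List Int) × List Int := ([[1, 2], [3]], [0, 1])

def Spec_indices_valeur_max (matrice : List (List Int)) (filtre : List Int) (out : Int × Int) : Prop := out = indices_valeur_max_alt matrice filtre
instance (matrice : List (List Int)) (filtre : List Int) (out : Int × Int) : Decidable (Spec_indices_valeur_max matrice filtre out) := by unfold Spec_indices_valeur_max; infer_instance

-- ===== CLAIM (what is proved, stated in full; the proofs are below) =====
def Claim_equal_indices_valeur_max : Prop := ∀ (matrice : List (List Int)) (filtre : List Int), Dom_indices_valeur_max matrice filtre → Pre_indices_valeur_max matrice filtre → Spec_indices_valeur_max matrice filtre (indices_valeur_max matrice filtre)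

-- ===== LEMMAS AND PROOFS =====
-- (max value of the row, index of its first occurrence), by structural recursion
def rowMax (ligne : List Int) : Option (Int × Nat) :=
  match ligne with
  | [] => none
  | x :: xs =>
      match rowMax xs with
      | none => some (x, 0)
      | some (m, k) => if m > x then some (m, k + 1) else some (x, 0)

theorem rowMax_eq_none_iff (ligne : List Int) : rowMax ligne = none ↔ ligne = [] := by
  cases ligne with
  | nil => simp [rowMax]
  | cons x xs =>
      simp only [rowMax]
      cases h : rowMax xs with
      | none => simp
      | some p => cases p with | mk m k => by_cases hmx : m > x <;> simp [hmx]

theorem foldl_max_comm (xs : List Int) : ∀ (a b : Int), xs.foldl max (max a b) = max a (xs.foldl max b) := by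
  induction xs with
  | nil => intro a b; simp
  | cons c t ih =>
      intro a b
      simp only [List.foldl_cons]
      have h : max (max a b) c = max a (max b c) := by
        rcases le_total a b with h1 | h1 <;> rcases le_total b c with h2 | h2 <;>
          simp [max_def] <;> omega
      rw [h, ih]

theorem rowMax_spec (ligne : List Int) (m : Int) (k : Nat) (h : rowMax ligne = some (m, k)) :
    PySem.List.max? ligne (fun x => x) = some m ∧ PySem.List.index? ligne m = some k := by
  induction ligne generalizing m k with
  | nil => simp [rowMax] at h
  | cons x xs ih =>
      rw [PySem.List.max?_id_cons]
      cases hxs : rowMax xs with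
      | none =>
          have hnil : xs = [] := (rowMax_eq_none_iff xs).mp hxs
          subst hnil
          simp [rowMax] at h
          obtain ⟨hm, hk⟩ := h
          subst hm; subst hk
          exact ⟨rfl, PySem.List.index?_cons_self x []⟩
      | some p =>
          cases p with
          | mk mx kx =>
              obtain ⟨hmax, hidx⟩ := ih mx kx hxs
              have hnonnil : xs ≠ [] := by
                intro hn; rw [hn] at hxs; simp [rowMax] at hxs
              obtain ⟨y, t, hyt⟩ := List.exists_cons_of_ne_nil hnonnil
              have hmaxfold : xs.foldl max x = max x mx := by
                have := PySem.List.max?_id_cons (x := y) (t := t)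
                rw [hyt] at hmax
                rw [this] at hmax
                have hmx : t.foldl max y = mx := by
                  simpa using hmax
                rw [hyt]
                simp only [List.foldl_cons]
                rw [← hmx, ← foldl_max_comm]
              simp only [rowMax, hxs] at h
              by_cases hgt : mx > x
              · simp [hgt] at h
                obtain ⟨hm, hk⟩ := h
                subst hm; subst hk
                constructor
                · rw [hmaxfold]; congr 1; omega
                · have hne : x ≠ mx := by omega
                  rw [PySem.List.index?_cons_of_ne xs hne, hidx]
                  rfl
              · simp [hgt] at h
                obtain ⟨hm, hk⟩ := h
                subst hm; subst hk
                constructor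
                · rw [hmaxfold]; congr 1; omega
                · exact PySem.List.index?_cons_self x xs

theorem ivmInner_spec (i : Int) (ligne : List Int) :
    ∀ (j0 : Nat) (iM jM vM : Int),
      ivmInner i j0 ligne (iM, jM, vM) =
        match rowMax ligne with
        | none => (iM, jM, vM)
        | some (m, k) => if m > vM then (i, ((j0 + k : Nat) : Int), m) else (iM, jM, vM) := by
  induction ligne with
  | nil => intro j0 iM jM vM; simp [ivmInner, rowMax]
  | cons x xs ih =>
      intro j0 iM jM vM
      simp only [ivmInner]
      by_cases hx : x > vM
      · simp only [hx, reduceIte]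
        rw [ih]
        cases hxs : rowMax xs with
        | none => simp [rowMax, hxs, hx]
        | some p =>
            cases p with
            | mk m k =>
                simp only [rowMax, hxs]
                by_cases hmx : m > x
                · have hmv : m > vM := by omega
                  simp only [hmx, hmv, reduceIte]
                  have : ((j0 + 1 + k : Nat) : Int) = ((j0 + (k + 1) : Nat) : Int) := by push_cast; omega
                  simp [this]
                · simp [hmx, hx]
      · simp only [hx, reduceIte]
        rw [ih]
        cases hxs : rowMax xs with
        | none => simp [rowMax, hxs, hx]
        | some p =>
            cases p with
            | mk m k =>
                simp only [rowMax, hxs]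
                by_cases hmx : m > x
                · by_cases hmv : m > vM
                  · have : ((j0 + 1 + k : Nat) : Int) = ((j0 + (k + 1) : Nat) : Int) := by push_cast; omega
                    simp [hmx, hmv, this]
                  · simp [hmx, hmv]
                · have hmv : ¬ m > vM := by omega
                  simp [hmx, hx, hmv]

theorem fold_agree (matrice : List (List Int)) (filtre : List Int) :
    ∀ (iM jM vM : Int),
      (filtre.foldl
        (fun (st : Int × Int × Int) (i : Int) =>
          let ligne := (PySem.List.pyGet? matrice i).getD []
          match PySem.List.max? ligne (fun x => x) with
          | none => st
          | some m =>
              if m > st.1 then (m, i, (((PySem.List.index? ligne m).getD 0 : Nat) : Int)) else st)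
        (vM, iM, jM)) =
      (fun (st : Int × Int × Int) => (st.2.2, st.1, st.2.1))
        (filtre.foldl
          (fun (st : Int × Int × Int) (i : Int) =>
            let ligne := (PySem.List.pyGet? matrice i).getD []
            ivmInner i 0 ligne st)
          (iM, jM, vM)) := by
  induction filtre with
  | nil => intro iM jM vM; rfl
  | cons i rest ih =>
      intro iM jM vM
      simp only [List.foldl_cons]
      set ligne := (PySem.List.pyGet? matrice i).getD [] with hligne
      rw [ivmInner_spec]
      cases hr : rowMax ligne with
      | none =>
          have hnil : ligne = [] := (rowMax_eq_none_iff ligne).mp hr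
          have hmaxnone : PySem.List.max? ligne (fun x => x) = none := by
            rw [hnil]; simp [PySem.List.max?_eq_none_iff]
          simp only [hmaxnone]
          exact ih iM jM vM
      | some p =>
          cases p with
          | mk m k =>
              obtain ⟨hmax, hidx⟩ := rowMax_spec ligne m k hr
              simp only [hmax, hidx]
              by_cases hm : m > vM
              · simp only [hm, reduceIte, Option.getD_some]
                have := ih i ((k : Nat) : Int) m
                simpa using this
              · simp only [hm, reduceIte]
                exact ih iM jM vM

-- ===== VERDICT (by name: the statement is the Claim_ definition above) =====
theorem indices_valeur_max_spec : Claim_equal_indices_valeur_max := by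
  intro matrice filtre _ _
  unfold Spec_indices_valeur_max indices_valeur_max indices_valeur_max_alt
  rw [fold_agree]
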